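-- pv_equiv track=rewrite | github.com/ljukemura/AdventofCode_2024 | AOC_2024/ex_04.py | check_regra
-- ===== SOURCE A (Python) =====
-- def check_regra(lista):
--     if len(lista) != len(set(lista)):
--         return False
--
--     if lista != sorted(lista) and lista != sorted(lista, reverse=True):
--         return False
--
--     for i in range(len(lista) - 1):
--         if abs(lista[i] - lista[i + 1]) > 3:
--             return False
--
--     return True
-- ===== SOURCE B (Python) =====
-- def check_regra(lista):
--     up = down = True
--     for a, b in zip(lista, lista[1:]):
--         d = b - a
--         if not (1 <= d <= 3):
--             up = False
--         if not (-3 <= d <= -1):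
--             down = False
--         if not (up or down):
--             return False
--     return up or down
-- ===== Notes on version B (the rewrite author's own statement) =====
-- stated objective: faster
-- what changed: replaced the sort-twice-plus-set uniqueness test by one linear pass over adjacent differences that tracks whether every step is between 1 and 3 (strictly increasing) or between -3 and -1 (strictly decreasing), which implies uniqueness and sortedness for free
import Mathlib
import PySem

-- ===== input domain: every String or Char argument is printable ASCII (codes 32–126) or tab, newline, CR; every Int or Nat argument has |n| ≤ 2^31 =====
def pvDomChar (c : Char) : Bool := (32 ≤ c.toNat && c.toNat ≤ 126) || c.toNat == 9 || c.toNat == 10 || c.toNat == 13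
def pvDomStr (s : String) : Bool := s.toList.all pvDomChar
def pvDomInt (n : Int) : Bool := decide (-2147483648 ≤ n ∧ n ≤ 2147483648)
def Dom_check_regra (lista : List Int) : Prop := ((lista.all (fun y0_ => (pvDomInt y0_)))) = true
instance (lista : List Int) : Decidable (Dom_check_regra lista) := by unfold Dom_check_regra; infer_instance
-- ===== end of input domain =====

-- B replaces A's set-uniqueness test and double sort by a single linear pass over adjacent
-- differences (each between 1 and 3, or each between -3 and -1); asymptotically faster (O(n) vs O(n log n)).

-- ===== PORT A =====
def check_regra (lista : List Int) : Bool :=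
  if (lista.length : Int) ≠ PySem.Set.len (PySem.Set.ofList lista) then false
  else if lista ≠ PySem.List.sorted lista (fun x => x) false ∧
          lista ≠ PySem.List.sorted lista (fun x => x) true then false
  else
    (PySem.List.pyRange 0 ((lista.length : Int) - 1) 1).all (fun i =>
      !decide (3 < |PySem.List.pyGetD lista i 0 - PySem.List.pyGetD lista (i + 1) 0|))

-- ===== PORT B =====
-- the loop body of Source B: state (up, down), early return False once both are gone
def check_regra_altLoop : List (Int × Int) → Bool → Bool → Bool
  | [], up, down => up || down
  | (a, b) :: rest, up, down =>
    let d := b - a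
    let up' := if ¬ (1 ≤ d ∧ d ≤ 3) then false else up
    let down' := if ¬ (-3 ≤ d ∧ d ≤ -1) then false else down
    if ¬ (up' || down') then false else check_regra_altLoop rest up' down'

def check_regra_alt (lista : List Int) : Bool :=
  check_regra_altLoop (lista.zip (PySem.List.slice lista (some 1) none)) true true

-- ===== PRECONDITION & SPEC =====
def Spec_check_regra (lista : List Int) (out : Bool) : Prop := out = check_regra_alt lista
instance (lista : List Int) (out : Bool) : Decidable (Spec_check_regra lista out) := by unfold Spec_check_regra; infer_instance

-- ===== CLAIM (what is proved, stated in full; the proofs are below) =====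
def Claim_equal_check_regra : Prop := ∀ (lista : List Int), Dom_check_regra lista → Spec_check_regra lista (check_regra lista)

-- ===== LEMMAS AND PROOFS =====

-- a zip-with-tail "all adjacent pairs" test is exactly List.IsChain
theorem zipAll_iff (p : Int → Int → Prop) [DecidableRel p] :
    ∀ (l : List Int), ((l.zip l.tail).all (fun q => decide (p q.1 q.2)) = true) ↔ l.IsChain p
  | [] => by simp
  | [a] => by simp
  | a :: b :: t => by
    have ih := zipAll_iff p (b :: t)
    simp only [List.tail_cons, List.zip_cons_cons, List.all_cons, Bool.and_eq_true,
      decide_eq_true_eq, List.isChain_cons_cons] at *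
    tauto

-- folding Set.add over fresh, duplicate-free elements just appends them
theorem ofList_aux (xs acc : List Int) (h : ∀ x ∈ xs, x ∉ acc) (hn : xs.Nodup) :
    xs.foldl PySem.Set.add acc = acc ++ xs := by
  induction xs generalizing acc with
  | nil => simp
  | cons x t ih =>
    simp only [List.foldl_cons]
    have hx : PySem.Set.add acc x = acc ++ [x] := by
      simp only [PySem.Set.add, PySem.Set.contains]
      rw [if_neg]
      simp only [List.contains_eq_mem, decide_eq_true_eq]
      exact h x (by simp)
    rw [hx, ih]
    · simp
    · intro y hy
      simp only [List.mem_append, List.mem_singleton]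
      rintro (hc | rfl)
      · exact h y (by simp [hy]) hc
      · exact (List.nodup_cons.mp hn).1 hy
    · exact (List.nodup_cons.mp hn).2

-- A's first test, len(lista) == len(set(lista)), is exactly Nodup
theorem nodup_iff_len (l : List Int) :
    ((l.length : Int) = PySem.Set.len (PySem.Set.ofList l)) ↔ l.Nodup := by
  constructor
  · intro h
    simp only [PySem.Set.len, Nat.cast_inj] at h
    have hsub : (PySem.Set.ofList l : List Int) ⊆ l := fun x hx => (PySem.Set.mem_ofList l x).mp hx
    have hsp := (PySem.Set.nodup_ofList l).subperm hsub
    have hperm := hsp.perm_of_length_le (by omega)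
    exact hperm.nodup (PySem.Set.nodup_ofList l)
  · intro h
    rw [PySem.Set.ofList_eq_foldl, ofList_aux l [] (by simp) h]
    simp [PySem.Set.len]

-- characterisation of A: unique, sorted one way or the other, adjacent |diff| ≤ 3
theorem A_iff (l : List Int) : check_regra l = true ↔
    l.Nodup ∧ (l = PySem.List.sorted l (fun x => x) ∨ l = PySem.List.sorted l (fun x => x) true)
      ∧ l.IsChain (fun a b => |a - b| ≤ 3) := by
  unfold check_regra
  split_ifs with h1 h2
  · simp only [false_iff]
    rintro ⟨hnd, -, -⟩
    exact h1 ((nodup_iff_len l).mpr hnd)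
  · simp only [false_iff]
    rintro ⟨-, hs, -⟩
    rcases hs with hs | hs
    · exact h2.1 hs
    · exact h2.2 hs
  · push_neg at h1
    rw [not_and_or, not_not, not_not] at h2
    simp only [(nodup_iff_len l).mp h1, true_and]
    have hs : l = PySem.List.sorted l (fun x => x) ∨ l = PySem.List.sorted l (fun x => x) true := h2
    simp only [hs, true_and]
    rw [List.all_eq_true, List.isChain_iff_getElem]
    constructor
    · intro h i hi
      have hmem : (i : Int) ∈ PySem.List.pyRange 0 ((l.length : Int) - 1) 1 := by
        rw [PySem.List.mem_pyRange_one]; omega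
      have := h _ hmem
      simp only [Bool.not_eq_eq_eq_not, Bool.not_true, decide_eq_false_iff_not, not_lt] at this
      have e : ((i : Int) + 1) = ((i + 1 : Nat) : Int) := by push_cast; ring
      rw [e] at this
      simp only [PySem.List.pyGetD_natCast] at this
      rwa [List.getD_eq_getElem l 0 (Nat.lt_of_succ_lt hi), List.getD_eq_getElem l 0 hi] at this
    · intro h i hmem
      rw [PySem.List.mem_pyRange_one] at hmem
      obtain ⟨k, rfl⟩ := Int.eq_ofNat_of_zero_le hmem.1
      have hk : k + 1 < l.length := by omega
      simp only [Bool.not_eq_eq_eq_not, Bool.not_true, decide_eq_false_iff_not, not_lt]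
      have e : ((k : Int) + 1) = ((k + 1 : Nat) : Int) := by push_cast; ring
      rw [e]
      simp only [PySem.List.pyGetD_natCast]
      rw [List.getD_eq_getElem l 0 (Nat.lt_of_succ_lt hk), List.getD_eq_getElem l 0 hk]
      exact h k hk

-- B's loop with its early exit, as two independent "all" tests
theorem altLoop_eq (ps : List (Int × Int)) (up down : Bool) :
    check_regra_altLoop ps up down =
      ((up && ps.all (fun q => decide (1 ≤ q.2 - q.1 ∧ q.2 - q.1 ≤ 3))) ||
       (down && ps.all (fun q => decide (-3 ≤ q.2 - q.1 ∧ q.2 - q.1 ≤ -1)))) := by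
  induction ps generalizing up down with
  | nil => cases up <;> cases down <;> simp [check_regra_altLoop]
  | cons q rest ih =>
    obtain ⟨a, b⟩ := q
    simp only [check_regra_altLoop]
    by_cases h1 : (1 : Int) ≤ b - a ∧ b - a ≤ 3 <;>
      by_cases h2 : (-3 : Int) ≤ b - a ∧ b - a ≤ -1 <;>
      simp only [h1, h2, not_false_eq_true, List.all_cons] <;>
      cases up <;> cases down <;> simp [ih]

-- characterisation of B: all adjacent diffs between 1 and 3, or all between -3 and -1
theorem B_iff (l : List Int) : check_regra_alt l = true ↔
    l.IsChain (fun a b => 1 ≤ b - a ∧ b - a ≤ 3) ∨ l.IsChain (fun a b => -3 ≤ b - a ∧ b - a ≤ -1) := by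
  have h1 := zipAll_iff (fun a b => 1 ≤ b - a ∧ b - a ≤ 3) l
  have h2 := zipAll_iff (fun a b => -3 ≤ b - a ∧ b - a ≤ -1) l
  unfold check_regra_alt
  rw [PySem.List.slice_from_one, altLoop_eq]
  simp only [Bool.true_and, Bool.or_eq_true]
  exact or_congr h1 h2

theorem main_eq (l : List Int) : check_regra l = check_regra_alt l := by
  rw [Bool.eq_iff_iff, A_iff, B_iff]
  constructor
  · rintro ⟨hnd, hs | hs, hd⟩
    · have hle : l.Pairwise (fun a b => a ≤ b) := by
        have := PySem.List.sorted_pairwise l (fun x => x); rwa [← hs] at this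
      have hlt : l.Pairwise (fun a b : Int => a < b) :=
        (hle.and hnd).imp (fun h => lt_of_le_of_ne h.1 h.2)
      left
      rw [List.isChain_iff_getElem] at hd ⊢
      intro i hi
      have hx := abs_le.mp (hd i hi)
      have hy := List.isChain_iff_getElem.mp hlt.isChain i hi
      constructor <;> omega
    · have hle : l.Pairwise (fun a b => b ≤ a) := by
        have := PySem.List.sorted_pairwise_rev l (fun x => x); rwa [← hs] at this
      have hlt : l.Pairwise (fun a b : Int => b < a) :=
        (hle.and hnd).imp (fun h => lt_of_le_of_ne h.1 (Ne.symm h.2))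
      right
      rw [List.isChain_iff_getElem] at hd ⊢
      intro i hi
      have hx := abs_le.mp (hd i hi)
      have hy := List.isChain_iff_getElem.mp hlt.isChain i hi
      constructor <;> omega
  · rintro (hc | hc)
    · have hlt : l.IsChain (fun a b : Int => a < b) := hc.imp (fun a b h => by omega)
      have hpw : l.Pairwise (fun a b : Int => a < b) := List.isChain_iff_pairwise.mp hlt
      refine ⟨hpw.imp (fun h => ne_of_lt h), Or.inl ?_, ?_⟩
      · exact (PySem.List.sorted_eq_of_perm_of_pairwise_lt l l (fun x => x) (List.Perm.refl l) hpw).symm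
      · exact hc.imp (fun a b h => by rw [abs_le]; omega)
    · have hlt : l.IsChain (fun a b : Int => b < a) := hc.imp (fun a b h => by omega)
      letI : Trans (fun a b : Int => b < a) (fun a b : Int => b < a) (fun a b : Int => b < a) :=
        ⟨fun h1 h2 => lt_trans h2 h1⟩
      have hpw : l.Pairwise (fun a b : Int => b < a) := List.isChain_iff_pairwise.mp hlt
      refine ⟨hpw.imp (fun h => (ne_of_lt h).symm), Or.inr ?_, ?_⟩
      · exact (PySem.List.sorted_rev_eq_of_perm_of_pairwise_gt l l (fun x => x) (List.Perm.refl l) hpw).symm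
      · exact hc.imp (fun a b h => by rw [abs_le]; omega)

-- ===== VERDICT (by name: the statement is the Claim_ definition above) =====
theorem check_regra_spec : Claim_equal_check_regra := by
  intro lista _
  exact main_eq lista
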